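-- pv_equiv track=rewrite | github.com/bitcoinaustria/kassiber | kassiber/core/reports.py | _austrian_disposal_split
-- ===== SOURCE A (Python) =====
-- def _austrian_disposal_split(rows):
--     split = {
--         "gains_proceeds": 0,
--         "gains_cost_basis": 0,
--         "gains_amount": 0,
--         "losses_proceeds": 0,
--         "losses_cost_basis": 0,
--         "losses_amount": 0,
--     }
--     for row in rows:
--         if row["kennzahl"] == 176:
--             split["losses_proceeds"] += int(row["proceeds_eur_cents"] or 0)
--             split["losses_cost_basis"] += int(row["cost_basis_eur_cents"] or 0)
--             split["losses_amount"] += int(row["form_amount_eur_cents"] or 0)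
--         elif row["kennzahl"] == 174:
--             split["gains_proceeds"] += int(row["proceeds_eur_cents"] or 0)
--             split["gains_cost_basis"] += int(row["cost_basis_eur_cents"] or 0)
--             split["gains_amount"] += int(row["form_amount_eur_cents"] or 0)
--     return split
-- ===== SOURCE B (Python) =====
-- def _austrian_disposal_split(rows):
--     gains = [row for row in rows if row["kennzahl"] == 174]
--     losses = [row for row in rows if row["kennzahl"] == 176]
--
--     def total(group, field):
--         return sum(int(row[field] or 0) for row in group)
--
--     return {
--         "gains_proceeds": total(gains, "proceeds_eur_cents"),
--         "gains_cost_basis": total(gains, "cost_basis_eur_cents"),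
--         "gains_amount": total(gains, "form_amount_eur_cents"),
--         "losses_proceeds": total(losses, "proceeds_eur_cents"),
--         "losses_cost_basis": total(losses, "cost_basis_eur_cents"),
--         "losses_amount": total(losses, "form_amount_eur_cents"),
--     }
-- ===== Notes on version B (the rewrite author's own statement) =====
-- stated objective: simpler
-- what changed: Replaces the single accumulating loop with if/elif over six mutable counters by a partition of the rows into gains (kennzahl 174) and losses (kennzahl 176) followed by six direct filtered sums.
import Mathlib
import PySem

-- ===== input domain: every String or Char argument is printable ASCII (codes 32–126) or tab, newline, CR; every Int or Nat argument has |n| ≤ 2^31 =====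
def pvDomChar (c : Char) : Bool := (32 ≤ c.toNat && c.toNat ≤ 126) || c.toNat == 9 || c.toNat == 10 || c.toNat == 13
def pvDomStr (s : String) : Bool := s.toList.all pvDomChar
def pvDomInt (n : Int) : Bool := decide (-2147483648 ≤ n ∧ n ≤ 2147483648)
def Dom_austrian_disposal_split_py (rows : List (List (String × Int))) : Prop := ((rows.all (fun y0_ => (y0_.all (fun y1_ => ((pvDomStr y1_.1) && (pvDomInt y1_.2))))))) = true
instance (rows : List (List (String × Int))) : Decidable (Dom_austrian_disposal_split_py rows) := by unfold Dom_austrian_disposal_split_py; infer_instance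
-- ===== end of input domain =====

-- B replaces A's single accumulating if/elif loop by a partition into gains/losses rows
-- followed by six direct filtered sums (objective: simpler decomposition, same cost).

-- ===== PORT A =====
-- Note: values are ints, so Python's `int(row[f] or 0)` equals row[f] (x or 0 is x unless
-- x == 0, in which case it is 0 = x); ported as the looked-up value itself.
-- The dict lookups row[...] raise KeyError on missing keys; those inputs are excluded by
-- Pre_ below, so the port reads them with getD 0.
def austrian_disposal_split_py (rows : List (List (String × Int))) : List (String × Int) :=
  let split : PySem.Dict String Int := PySem.Dict.mk
    [("gains_proceeds", 0), ("gains_cost_basis", 0), ("gains_amount", 0),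
     ("losses_proceeds", 0), ("losses_cost_basis", 0), ("losses_amount", 0)]
  let split := rows.foldl (fun split row =>
    let r := PySem.Dict.mk row
    if PySem.Dict.getD r "kennzahl" 0 == 176 then
      let split := split.modify "losses_proceeds" 0 (· + PySem.Dict.getD r "proceeds_eur_cents" 0)
      let split := split.modify "losses_cost_basis" 0 (· + PySem.Dict.getD r "cost_basis_eur_cents" 0)
      let split := split.modify "losses_amount" 0 (· + PySem.Dict.getD r "form_amount_eur_cents" 0)
      split
    else if PySem.Dict.getD r "kennzahl" 0 == 174 then
      let split := split.modify "gains_proceeds" 0 (· + PySem.Dict.getD r "proceeds_eur_cents" 0)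
      let split := split.modify "gains_cost_basis" 0 (· + PySem.Dict.getD r "cost_basis_eur_cents" 0)
      let split := split.modify "gains_amount" 0 (· + PySem.Dict.getD r "form_amount_eur_cents" 0)
      split
    else split) split
  split.items

-- ===== PORT B =====
def pvKz (row : List (String × Int)) : Int := PySem.Dict.getD (PySem.Dict.mk row) "kennzahl" 0

def pvTot (group : List (List (String × Int))) (field : String) : Int :=
  (group.map (fun row => PySem.Dict.getD (PySem.Dict.mk row) field 0)).sum

def austrian_disposal_split_py_alt (rows : List (List (String × Int))) : List (String × Int) :=
  let gains := rows.filter (fun row => pvKz row == 174)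
  let losses := rows.filter (fun row => pvKz row == 176)
  [("gains_proceeds", pvTot gains "proceeds_eur_cents"),
   ("gains_cost_basis", pvTot gains "cost_basis_eur_cents"),
   ("gains_amount", pvTot gains "form_amount_eur_cents"),
   ("losses_proceeds", pvTot losses "proceeds_eur_cents"),
   ("losses_cost_basis", pvTot losses "cost_basis_eur_cents"),
   ("losses_amount", pvTot losses "form_amount_eur_cents")]

-- ===== PRECONDITION & SPEC =====
-- Pre_ excludes exactly the inputs on which Python A raises KeyError: a row without the
-- "kennzahl" key, or a row with kennzahl 174/176 missing one of the three summed fields.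
def Pre_austrian_disposal_split_py (rows : List (List (String × Int))) : Prop :=
  ∀ row ∈ rows,
    (PySem.Dict.mk row).contains "kennzahl" = true ∧
    ((PySem.Dict.getD (PySem.Dict.mk row) "kennzahl" 0 = 174 ∨
      PySem.Dict.getD (PySem.Dict.mk row) "kennzahl" 0 = 176) →
      (PySem.Dict.mk row).contains "proceeds_eur_cents" = true ∧
      (PySem.Dict.mk row).contains "cost_basis_eur_cents" = true ∧
      (PySem.Dict.mk row).contains "form_amount_eur_cents" = true)
instance (rows : List (List (String × Int))) : Decidable (Pre_austrian_disposal_split_py rows) := by unfold Pre_austrian_disposal_split_py; infer_instance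

def pvWitness_austrian_disposal_split_py : (List (List (String × Int))) :=
  [[("kennzahl", 174), ("proceeds_eur_cents", 5), ("cost_basis_eur_cents", 2), ("form_amount_eur_cents", 3)],
   [("kennzahl", 176), ("proceeds_eur_cents", 1), ("cost_basis_eur_cents", 4), ("form_amount_eur_cents", -3)],
   [("kennzahl", 0)]]

def Spec_austrian_disposal_split_py (rows : List (List (String × Int))) (out : List (String × Int)) : Prop := out = austrian_disposal_split_py_alt rows
instance (rows : List (List (String × Int))) (out : List (String × Int)) : Decidable (Spec_austrian_disposal_split_py rows out) := by unfold Spec_austrian_disposal_split_py; infer_instance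

-- ===== CLAIM (what is proved, stated in full; the proofs are below) =====
def Claim_equal_austrian_disposal_split_py : Prop := ∀ (rows : List (List (String × Int))), Dom_austrian_disposal_split_py rows → Pre_austrian_disposal_split_py rows → Spec_austrian_disposal_split_py rows (austrian_disposal_split_py rows)

-- ===== LEMMAS AND PROOFS =====

-- the fold state always keeps the literal six-key shape; S abbreviates it
def pvS (a b c d e f : Int) : PySem.Dict String Int :=
  PySem.Dict.mk
    [("gains_proceeds", a), ("gains_cost_basis", b), ("gains_amount", c),
     ("losses_proceeds", d), ("losses_cost_basis", e), ("losses_amount", f)]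

-- A's loop, characterised: starting from pvS a b c d e f it adds B's six filtered sums
theorem pvFold_char (rows : List (List (String × Int))) :
    ∀ a b c d e f : Int,
    rows.foldl (fun split row =>
      let r := PySem.Dict.mk row
      if PySem.Dict.getD r "kennzahl" 0 == 176 then
        let split := split.modify "losses_proceeds" 0 (· + PySem.Dict.getD r "proceeds_eur_cents" 0)
        let split := split.modify "losses_cost_basis" 0 (· + PySem.Dict.getD r "cost_basis_eur_cents" 0)
        let split := split.modify "losses_amount" 0 (· + PySem.Dict.getD r "form_amount_eur_cents" 0)
        split
      else if PySem.Dict.getD r "kennzahl" 0 == 174 then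
        let split := split.modify "gains_proceeds" 0 (· + PySem.Dict.getD r "proceeds_eur_cents" 0)
        let split := split.modify "gains_cost_basis" 0 (· + PySem.Dict.getD r "cost_basis_eur_cents" 0)
        let split := split.modify "gains_amount" 0 (· + PySem.Dict.getD r "form_amount_eur_cents" 0)
        split
      else split) (pvS a b c d e f)
    = pvS (a + pvTot (rows.filter (fun row => pvKz row == 174)) "proceeds_eur_cents")
          (b + pvTot (rows.filter (fun row => pvKz row == 174)) "cost_basis_eur_cents")
          (c + pvTot (rows.filter (fun row => pvKz row == 174)) "form_amount_eur_cents")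
          (d + pvTot (rows.filter (fun row => pvKz row == 176)) "proceeds_eur_cents")
          (e + pvTot (rows.filter (fun row => pvKz row == 176)) "cost_basis_eur_cents")
          (f + pvTot (rows.filter (fun row => pvKz row == 176)) "form_amount_eur_cents") := by
  induction rows with
  | nil => intro a b c d e f; simp [pvTot]
  | cons row rest ih =>
    intro a b c d e f
    by_cases h76 : pvKz row == 176
    · have hstep :
        (fun split (row : List (String × Int)) =>
          let r := PySem.Dict.mk row
          if PySem.Dict.getD r "kennzahl" 0 == 176 then
            let split := PySem.Dict.modify split "losses_proceeds" 0 (· + PySem.Dict.getD r "proceeds_eur_cents" 0)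
            let split := PySem.Dict.modify split "losses_cost_basis" 0 (· + PySem.Dict.getD r "cost_basis_eur_cents" 0)
            let split := PySem.Dict.modify split "losses_amount" 0 (· + PySem.Dict.getD r "form_amount_eur_cents" 0)
            split
          else if PySem.Dict.getD r "kennzahl" 0 == 174 then
            let split := PySem.Dict.modify split "gains_proceeds" 0 (· + PySem.Dict.getD r "proceeds_eur_cents" 0)
            let split := PySem.Dict.modify split "gains_cost_basis" 0 (· + PySem.Dict.getD r "cost_basis_eur_cents" 0)
            let split := PySem.Dict.modify split "gains_amount" 0 (· + PySem.Dict.getD r "form_amount_eur_cents" 0)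
            split
          else split) (pvS a b c d e f) row
        = pvS a b c
            (d + PySem.Dict.getD (PySem.Dict.mk row) "proceeds_eur_cents" 0)
            (e + PySem.Dict.getD (PySem.Dict.mk row) "cost_basis_eur_cents" 0)
            (f + PySem.Dict.getD (PySem.Dict.mk row) "form_amount_eur_cents" 0) := by
        simp only [pvKz] at h76
        simp only [pvS, h76, if_pos, PySem.Dict.modify]
        exact PySem.Dict.ext rfl
      have he : PySem.Dict.getD (PySem.Dict.mk row) "kennzahl" 0 = 176 := by
        simpa [pvKz] using h76
      simp only [List.foldl_cons, hstep, ih]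
      simp [pvTot, pvKz, he, add_assoc]
    · by_cases h74 : pvKz row == 174
      · have hstep :
          (fun split (row : List (String × Int)) =>
            let r := PySem.Dict.mk row
            if PySem.Dict.getD r "kennzahl" 0 == 176 then
              let split := PySem.Dict.modify split "losses_proceeds" 0 (· + PySem.Dict.getD r "proceeds_eur_cents" 0)
              let split := PySem.Dict.modify split "losses_cost_basis" 0 (· + PySem.Dict.getD r "cost_basis_eur_cents" 0)
              let split := PySem.Dict.modify split "losses_amount" 0 (· + PySem.Dict.getD r "form_amount_eur_cents" 0)
              split
            else if PySem.Dict.getD r "kennzahl" 0 == 174 then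
              let split := PySem.Dict.modify split "gains_proceeds" 0 (· + PySem.Dict.getD r "proceeds_eur_cents" 0)
              let split := PySem.Dict.modify split "gains_cost_basis" 0 (· + PySem.Dict.getD r "cost_basis_eur_cents" 0)
              let split := PySem.Dict.modify split "gains_amount" 0 (· + PySem.Dict.getD r "form_amount_eur_cents" 0)
              split
            else split) (pvS a b c d e f) row
          = pvS (a + PySem.Dict.getD (PySem.Dict.mk row) "proceeds_eur_cents" 0)
                (b + PySem.Dict.getD (PySem.Dict.mk row) "cost_basis_eur_cents" 0)
                (c + PySem.Dict.getD (PySem.Dict.mk row) "form_amount_eur_cents" 0)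
                d e f := by
          simp only [pvKz] at h76 h74
          simp only [pvS, h76, h74, Bool.false_eq_true, if_false, if_pos, PySem.Dict.modify]
          exact PySem.Dict.ext rfl
        have he : PySem.Dict.getD (PySem.Dict.mk row) "kennzahl" 0 = 174 := by
          simpa [pvKz] using h74
        simp only [List.foldl_cons, hstep, ih]
        simp [pvTot, pvKz, he, add_assoc]
      · have hstep :
          (fun split (row : List (String × Int)) =>
            let r := PySem.Dict.mk row
            if PySem.Dict.getD r "kennzahl" 0 == 176 then
              let split := PySem.Dict.modify split "losses_proceeds" 0 (· + PySem.Dict.getD r "proceeds_eur_cents" 0)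
              let split := PySem.Dict.modify split "losses_cost_basis" 0 (· + PySem.Dict.getD r "cost_basis_eur_cents" 0)
              let split := PySem.Dict.modify split "losses_amount" 0 (· + PySem.Dict.getD r "form_amount_eur_cents" 0)
              split
            else if PySem.Dict.getD r "kennzahl" 0 == 174 then
              let split := PySem.Dict.modify split "gains_proceeds" 0 (· + PySem.Dict.getD r "proceeds_eur_cents" 0)
              let split := PySem.Dict.modify split "gains_cost_basis" 0 (· + PySem.Dict.getD r "cost_basis_eur_cents" 0)
              let split := PySem.Dict.modify split "gains_amount" 0 (· + PySem.Dict.getD r "form_amount_eur_cents" 0)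
              split
            else split) (pvS a b c d e f) row
          = pvS a b c d e f := by
          simp only [pvKz] at h76 h74
          simp [pvS, h76, h74]
        have he76 : ¬ PySem.Dict.getD (PySem.Dict.mk row) "kennzahl" 0 = 176 := by
          simpa [pvKz] using h76
        have he74 : ¬ PySem.Dict.getD (PySem.Dict.mk row) "kennzahl" 0 = 174 := by
          simpa [pvKz] using h74
        simp only [List.foldl_cons, hstep, ih]
        simp [pvTot, pvKz, he76, he74]

-- ===== VERDICT (by name: the statement is the Claim_ definition above) =====
theorem austrian_disposal_split_py_spec : Claim_equal_austrian_disposal_split_py := by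
  intro rows _ _
  unfold Spec_austrian_disposal_split_py austrian_disposal_split_py austrian_disposal_split_py_alt
  have h := pvFold_char rows 0 0 0 0 0 0
  simp only [pvS] at h
  simp only [h]
  simp
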